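-- pv_equiv track=rewrite | github.com/randomraiderttu/aoc2022 | day5/day5.py | splitInputfile
-- ===== SOURCE A (Python) =====
-- def splitInputfile(recs: list[str]) -> tuple[list[str], list[str]]:
--     crateInput = []
--     instructionInput = []
--     boolSplitMarker = False
--
--     for rec in recs:
--         if not rec:
--             boolSplitMarker = True
--             continue
--
--         if boolSplitMarker:
--             instructionInput.append(rec)
--         else:
--             crateInput.append(rec)
--
--     # Get the crate input in bottom to top order to make it easier to add to my queues
--     crateInput.reverse()
--
--     return crateInput, instructionInput
-- ===== SOURCE B (Python) =====
-- def splitInputfile(recs: list[str]) -> tuple[list[str], list[str]]: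
--     try:
--         idx = recs.index("")
--     except ValueError:
--         idx = len(recs)
--     crateInput = list(reversed(recs[:idx]))
--     instructionInput = [rec for rec in recs[idx + 1:] if rec]
--     return crateInput, instructionInput
-- ===== Notes on version B (the rewrite author's own statement) =====
-- stated objective: idiomatic
-- what changed: B computes the index of the first blank line up front and builds both halves by slicing (reversed prefix, filtered suffix), instead of A's single pass with a latching boolean flag and per-line appends plus a final in-place reverse.
import Mathlib
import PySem

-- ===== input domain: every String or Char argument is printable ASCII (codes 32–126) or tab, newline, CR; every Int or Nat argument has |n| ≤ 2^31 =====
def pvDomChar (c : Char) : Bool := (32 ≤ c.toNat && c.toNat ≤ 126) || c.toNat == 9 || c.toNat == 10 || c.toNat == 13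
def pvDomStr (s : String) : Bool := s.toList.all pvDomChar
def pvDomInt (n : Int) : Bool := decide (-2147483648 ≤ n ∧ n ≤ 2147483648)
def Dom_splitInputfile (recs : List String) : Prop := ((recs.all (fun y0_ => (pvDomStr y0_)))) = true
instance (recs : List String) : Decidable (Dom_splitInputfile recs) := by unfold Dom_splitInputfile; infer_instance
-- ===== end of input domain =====

-- ===== PORT A =====
-- B replaces A's latching-flag single pass by an up-front index of the first blank line plus slicing; same O(n) cost.
-- A's loop: state (crateInput, instructionInput, boolSplitMarker), in order.
def splitInputfileGo (recs : List String) (crate instr : List String) (flag : Bool) :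
    List String × List String :=
  match recs with
  | [] => (crate, instr)
  | rec :: rest =>
    if rec = "" then splitInputfileGo rest crate instr true
    else if flag then splitInputfileGo rest crate (instr ++ [rec]) flag
    else splitInputfileGo rest (crate ++ [rec]) instr flag

def splitInputfile (recs : List String) : List String × List String :=
  let (crate, instr) := splitInputfileGo recs [] [] false
  (crate.reverse, instr)

-- ===== PORT B =====
-- recs.index("") with the except-branch setting idx = len(recs); slices recs[:idx] and recs[idx+1:]
-- are exact as take/drop since 0 ≤ idx ≤ recs.length.
def splitInputfile_alt (recs : List String) : List String × List String :=
  let idx := (PySem.List.index? recs "").getD recs.length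
  ((recs.take idx).reverse, (recs.drop (idx + 1)).filter (fun rec => rec ≠ ""))

-- ===== PRECONDITION & SPEC =====
def Spec_splitInputfile (recs : List String) (out : List String × List String) : Prop := out = splitInputfile_alt recs
instance (recs : List String) (out : List String × List String) : Decidable (Spec_splitInputfile recs out) := by unfold Spec_splitInputfile; infer_instance

-- ===== CLAIM (what is proved, stated in full; the proofs are below) =====
def Claim_equal_splitInputfile : Prop := ∀ (recs : List String), Dom_splitInputfile recs → Spec_splitInputfile recs (splitInputfile recs)

-- ===== LEMMAS AND PROOFS =====

theorem splitInputfileGo_true (recs crate instr : List String) :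
    splitInputfileGo recs crate instr true
      = (crate, instr ++ recs.filter (fun rec => rec ≠ "")) := by
  induction recs generalizing instr with
  | nil => simp [splitInputfileGo]
  | cons r rest ih =>
    by_cases hr : r = ""
    · simp [splitInputfileGo, hr, ih]
    · simp [splitInputfileGo, hr, ih]

theorem splitInputfileGo_false (recs crate instr : List String) :
    splitInputfileGo recs crate instr false
      = match PySem.List.index? recs "" with
        | none => (crate ++ recs, instr)
        | some k => (crate ++ recs.take k,
                     instr ++ (recs.drop (k + 1)).filter (fun rec => rec ≠ "")) := by
  induction recs generalizing crate with
  | nil => simp [splitInputfileGo, PySem.List.index?]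
  | cons r rest ih =>
    by_cases hr : r = ""
    · subst hr
      rw [PySem.List.index?_cons_self]
      simp [splitInputfileGo, splitInputfileGo_true]
    · rw [PySem.List.index?_cons_of_ne (x := r) (v := "") (xs := rest) hr]
      simp only [splitInputfileGo, if_neg hr, Bool.false_eq_true, if_false]
      rw [ih]
      cases h : PySem.List.index? rest "" with
      | none => simp
      | some k => simp

-- ===== VERDICT (by name: the statement is the Claim_ definition above) =====
theorem splitInputfile_spec : Claim_equal_splitInputfile := by
  intro recs _
  unfold Spec_splitInputfile splitInputfile splitInputfile_alt
  rw [splitInputfileGo_false]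
  cases h : PySem.List.index? recs "" with
  | none => simp [List.drop_eq_nil_of_le (Nat.le_add_right recs.length 1)]
  | some k => simp
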